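-- pv_equiv track=rewrite | github.com/BaronLiu1993/code-knowledge-graph | utils/graph/builder.py | _find_matching_node
-- ===== SOURCE A (Python) =====
-- def _find_matching_node(module_ref, nodes):
--     normalized = module_ref.replace("./", "").replace("../", "").replace("\\", "/")
--     for path in nodes:
--         if path.endswith(normalized) or normalized in path:
--             return path
--     stem = normalized.split("/")[-1]
--     for path in nodes:
--         if path.split("/")[-1].startswith(stem):
--             return path
--     return None
-- ===== SOURCE B (Python) =====
-- def _find_matching_node(module_ref, nodes):
--     normalized = module_ref.replace("./", "").replace("../", "").replace("\\", "/")
--     stem = normalized.split("/")[-1]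
--     fallback = None
--     for path in nodes:
--         if path.endswith(normalized) or normalized in path:
--             return path
--         if fallback is None and path.split("/")[-1].startswith(stem):
--             fallback = path
--     return fallback
-- ===== Notes on version B (the rewrite author's own statement) =====
-- stated objective: alternative
-- what changed: Replaces A's two sequential scans (pass-1 substring/suffix match, then pass-2 stem-prefix fallback) with a single scan that returns on a pass-1 match and remembers the first pass-2 candidate in a fallback variable returned after the loop.
import Mathlib
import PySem

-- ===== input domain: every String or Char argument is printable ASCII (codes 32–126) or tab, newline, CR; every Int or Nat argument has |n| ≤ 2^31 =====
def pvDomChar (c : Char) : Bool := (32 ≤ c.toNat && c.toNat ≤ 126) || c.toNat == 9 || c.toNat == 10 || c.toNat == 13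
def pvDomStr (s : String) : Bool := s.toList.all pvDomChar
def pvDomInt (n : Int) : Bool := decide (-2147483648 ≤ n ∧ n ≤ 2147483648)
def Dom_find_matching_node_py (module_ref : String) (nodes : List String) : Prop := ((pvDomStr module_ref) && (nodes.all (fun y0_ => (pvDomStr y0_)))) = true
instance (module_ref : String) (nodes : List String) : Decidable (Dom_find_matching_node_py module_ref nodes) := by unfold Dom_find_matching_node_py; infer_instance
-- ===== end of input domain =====

-- ===== PORT A =====
-- B does A's two scans in one pass with a fallback accumulator (alternative decomposition, same result).
-- path.split("/")[-1], shared by both Pythons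
def pvLastSeg (s : String) : String :=
  (((PySem.Str.split? s "/").getD []).getLastD "")

def pvNormalize (module_ref : String) : String :=
  PySem.Str.replace (PySem.Str.replace (PySem.Str.replace module_ref "./" "") "../" "") "\\" "/"

-- pass-1 loop of A: first path with endswith/substring match
def findPass1 (normalized : String) : List String → Option String
  | [] => none
  | p :: rest =>
      if PySem.Str.endswith p normalized || PySem.Str.isIn normalized p then some p
      else findPass1 normalized rest

-- pass-2 loop of A: first path whose last segment starts with stem
def findPass2 (stem : String) : List String → Option String
  | [] => none
  | p :: rest =>
      if PySem.Str.startswith (pvLastSeg p) stem then some p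
      else findPass2 stem rest

def find_matching_node_py (module_ref : String) (nodes : List String) : Option String :=
  let normalized := pvNormalize module_ref
  match findPass1 normalized nodes with
  | some p => some p
  | none =>
      let stem := pvLastSeg normalized
      match findPass2 stem nodes with
      | some p => some p
      | none => none

-- ===== PORT B =====
-- single loop: return on pass-1 match, keep the first pass-2 candidate as fallback
def altGo (normalized stem : String) (fallback : Option String) : List String → Option String
  | [] => fallback
  | p :: rest =>
      if PySem.Str.endswith p normalized || PySem.Str.isIn normalized p then some p
      else
        altGo normalized stem
          (if fallback.isNone && PySem.Str.startswith (pvLastSeg p) stem then some p else fallback)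
          rest

def find_matching_node_py_alt (module_ref : String) (nodes : List String) : Option String :=
  let normalized := pvNormalize module_ref
  let stem := pvLastSeg normalized
  altGo normalized stem none nodes

-- ===== PRECONDITION & SPEC =====
def Spec_find_matching_node_py (module_ref : String) (nodes : List String) (out : Option String) : Prop := out = find_matching_node_py_alt module_ref nodes
instance (module_ref : String) (nodes : List String) (out : Option String) : Decidable (Spec_find_matching_node_py module_ref nodes out) := by unfold Spec_find_matching_node_py; infer_instance

-- ===== CLAIM (what is proved, stated in full; the proofs are below) =====
def Claim_equal_find_matching_node_py : Prop := ∀ (module_ref : String) (nodes : List String), Dom_find_matching_node_py module_ref nodes → Spec_find_matching_node_py module_ref nodes (find_matching_node_py module_ref nodes)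

-- ===== LEMMAS AND PROOFS =====

-- the single loop computes pass-1 first, then the stored fallback, then the rest of pass-2
theorem altGo_eq (normalized stem : String) (fb : Option String) (ns : List String) :
    altGo normalized stem fb ns =
      match findPass1 normalized ns with
      | some p => some p
      | none => match fb with
                | some q => some q
                | none => findPass2 stem ns := by
  induction ns generalizing fb with
  | nil => cases fb <;> simp [altGo, findPass1, findPass2]
  | cons p rest ih =>
      simp only [altGo, findPass1, findPass2]
      by_cases h1 : (PySem.Str.endswith p normalized || PySem.Str.isIn normalized p) = true
      · rw [if_pos h1, if_pos h1]
      · rw [if_neg h1, if_neg h1, ih]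
        cases fb with
        | some q => simp
        | none =>
            by_cases h2 : PySem.Chars.startswith (pvLastSeg p).toList stem.toList = true
            · cases hq : findPass1 normalized rest <;> simp [hq, h2]
            · cases hq : findPass1 normalized rest <;> simp [hq, h2]

-- ===== VERDICT (by name: the statement is the Claim_ definition above) =====
theorem find_matching_node_py_spec : Claim_equal_find_matching_node_py := by
  intro module_ref nodes _
  unfold Spec_find_matching_node_py find_matching_node_py find_matching_node_py_alt
  rw [altGo_eq]
  cases hp : findPass1 (pvNormalize module_ref) nodes <;>
    cases hq : findPass2 (pvLastSeg (pvNormalize module_ref)) nodes <;> simp [hp, hq]
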